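-- pv_equiv track=rewrite | github.com/BigMe123/BRGSentimentbot | sentiment_bot/gdp_unified.py | _get_peer_countries
-- ===== SOURCE A (Python) =====
-- from typing import Dict, List, Tuple, Optional, Union, Any
--
-- def _get_peer_countries(iso: str) -> List[str]:
--     """Get peer countries for panel regularization"""
--
--     peer_groups = {
--         'G7': ['USA', 'CAN', 'GBR', 'DEU', 'FRA', 'ITA', 'JPN'],
--         'BRICS': ['BRA', 'RUS', 'IND', 'CHN', 'ZAF'],
--         'ASEAN': ['SGP', 'MYS', 'THA', 'IDN', 'PHL', 'VNM'],
--         'LATAM': ['BRA', 'MEX', 'ARG', 'CHL', 'COL', 'PER'],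
--         'MENA': ['SAU', 'ARE', 'EGY', 'TUR', 'ISR', 'MAR'],
--     }
--
--     for group_name, members in peer_groups.items():
--         if iso in members:
--             return [m for m in members if m != iso]
--
--     # Default to similar income level
--     return ['USA', 'DEU', 'JPN'] if iso in ['GBR', 'FRA', 'ITA'] else ['BRA', 'IND', 'MEX']
-- ===== SOURCE B (Python) =====
-- # Peer lists for the fixed groups, precomputed into one flat lookup table
-- # (first group containing a country wins, so BRA carries its BRICS peers).
-- _PEER_TABLE = {
--     'USA': ['CAN', 'GBR', 'DEU', 'FRA', 'ITA', 'JPN'],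
--     'CAN': ['USA', 'GBR', 'DEU', 'FRA', 'ITA', 'JPN'],
--     'GBR': ['USA', 'CAN', 'DEU', 'FRA', 'ITA', 'JPN'],
--     'DEU': ['USA', 'CAN', 'GBR', 'FRA', 'ITA', 'JPN'],
--     'FRA': ['USA', 'CAN', 'GBR', 'DEU', 'ITA', 'JPN'],
--     'ITA': ['USA', 'CAN', 'GBR', 'DEU', 'FRA', 'JPN'],
--     'JPN': ['USA', 'CAN', 'GBR', 'DEU', 'FRA', 'ITA'],
--     'BRA': ['RUS', 'IND', 'CHN', 'ZAF'],
--     'RUS': ['BRA', 'IND', 'CHN', 'ZAF'],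
--     'IND': ['BRA', 'RUS', 'CHN', 'ZAF'],
--     'CHN': ['BRA', 'RUS', 'IND', 'ZAF'],
--     'ZAF': ['BRA', 'RUS', 'IND', 'CHN'],
--     'SGP': ['MYS', 'THA', 'IDN', 'PHL', 'VNM'],
--     'MYS': ['SGP', 'THA', 'IDN', 'PHL', 'VNM'],
--     'THA': ['SGP', 'MYS', 'IDN', 'PHL', 'VNM'],
--     'IDN': ['SGP', 'MYS', 'THA', 'PHL', 'VNM'],
--     'PHL': ['SGP', 'MYS', 'THA', 'IDN', 'VNM'],
--     'VNM': ['SGP', 'MYS', 'THA', 'IDN', 'PHL'],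
--     'MEX': ['BRA', 'ARG', 'CHL', 'COL', 'PER'],
--     'ARG': ['BRA', 'MEX', 'CHL', 'COL', 'PER'],
--     'CHL': ['BRA', 'MEX', 'ARG', 'COL', 'PER'],
--     'COL': ['BRA', 'MEX', 'ARG', 'CHL', 'PER'],
--     'PER': ['BRA', 'MEX', 'ARG', 'CHL', 'COL'],
--     'SAU': ['ARE', 'EGY', 'TUR', 'ISR', 'MAR'],
--     'ARE': ['SAU', 'EGY', 'TUR', 'ISR', 'MAR'],
--     'EGY': ['SAU', 'ARE', 'TUR', 'ISR', 'MAR'],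
--     'TUR': ['SAU', 'ARE', 'EGY', 'ISR', 'MAR'],
--     'ISR': ['SAU', 'ARE', 'EGY', 'TUR', 'MAR'],
--     'MAR': ['SAU', 'ARE', 'EGY', 'TUR', 'ISR'],
-- }
--
--
-- def _get_peer_countries(iso: str):
--     """Get peer countries for panel regularization"""
--     # GBR/FRA/ITA are in the table, so A's income-level branch of the
--     # default is unreachable; the default is always ['BRA','IND','MEX'].
--     return _PEER_TABLE.get(iso, ['BRA', 'IND', 'MEX'])
-- ===== Notes on version B (the rewrite author's own statement) =====
-- stated objective: simpler
-- what changed: B replaces A's per-call scan of the group lists and filter-on-hit by a flat precomputed member->peers table consulted with one dict.get, and drops A's unreachable GBR/FRA/ITA default branch (those codes are G7 members, so the branch never fires).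
import Mathlib
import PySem

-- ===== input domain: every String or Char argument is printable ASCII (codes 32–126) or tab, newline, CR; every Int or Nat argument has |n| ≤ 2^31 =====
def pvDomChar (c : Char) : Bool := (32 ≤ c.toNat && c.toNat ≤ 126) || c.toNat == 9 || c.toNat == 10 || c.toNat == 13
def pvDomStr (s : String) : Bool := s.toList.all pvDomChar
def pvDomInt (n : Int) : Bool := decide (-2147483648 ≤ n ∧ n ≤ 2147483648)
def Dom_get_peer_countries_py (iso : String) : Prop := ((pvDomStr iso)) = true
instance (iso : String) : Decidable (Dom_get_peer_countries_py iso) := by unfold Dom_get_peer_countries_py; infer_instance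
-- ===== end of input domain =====

-- B answers from a flat precomputed member→peers table with one lookup (A's GBR/FRA/ITA default branch is unreachable, so B's default is the single list); A scans the group lists and filters on the hit. Simpler per-call work, same result.

-- ===== PORT A =====
def pvGroupsA : List (String × List String) :=
  [("G7", ["USA", "CAN", "GBR", "DEU", "FRA", "ITA", "JPN"]),
   ("BRICS", ["BRA", "RUS", "IND", "CHN", "ZAF"]),
   ("ASEAN", ["SGP", "MYS", "THA", "IDN", "PHL", "VNM"]),
   ("LATAM", ["BRA", "MEX", "ARG", "CHL", "COL", "PER"]),
   ("MENA", ["SAU", "ARE", "EGY", "TUR", "ISR", "MAR"])]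

-- the 'for group_name, members in peer_groups.items(): if iso in members: return ...' loop
def pvLoopA (iso : String) : List (String × List String) → Option (List String)
  | [] => none
  | (_, members) :: rest =>
      if iso ∈ members then some (members.filter (fun m => m != iso))
      else pvLoopA iso rest

def get_peer_countries_py (iso : String) : List String :=
  match pvLoopA iso pvGroupsA with
  | some r => r
  | none => if iso ∈ ["GBR", "FRA", "ITA"] then ["USA", "DEU", "JPN"] else ["BRA", "IND", "MEX"]

-- ===== PORT B =====
-- the literal _PEER_TABLE dict (distinct keys, insertion order)
def pvPeerTable : PySem.Dict String (List String) :=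
  PySem.Dict.mk
    [("USA", ["CAN", "GBR", "DEU", "FRA", "ITA", "JPN"]),
     ("CAN", ["USA", "GBR", "DEU", "FRA", "ITA", "JPN"]),
     ("GBR", ["USA", "CAN", "DEU", "FRA", "ITA", "JPN"]),
     ("DEU", ["USA", "CAN", "GBR", "FRA", "ITA", "JPN"]),
     ("FRA", ["USA", "CAN", "GBR", "DEU", "ITA", "JPN"]),
     ("ITA", ["USA", "CAN", "GBR", "DEU", "FRA", "JPN"]),
     ("JPN", ["USA", "CAN", "GBR", "DEU", "FRA", "ITA"]),
     ("BRA", ["RUS", "IND", "CHN", "ZAF"]),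
     ("RUS", ["BRA", "IND", "CHN", "ZAF"]),
     ("IND", ["BRA", "RUS", "CHN", "ZAF"]),
     ("CHN", ["BRA", "RUS", "IND", "ZAF"]),
     ("ZAF", ["BRA", "RUS", "IND", "CHN"]),
     ("SGP", ["MYS", "THA", "IDN", "PHL", "VNM"]),
     ("MYS", ["SGP", "THA", "IDN", "PHL", "VNM"]),
     ("THA", ["SGP", "MYS", "IDN", "PHL", "VNM"]),
     ("IDN", ["SGP", "MYS", "THA", "PHL", "VNM"]),
     ("PHL", ["SGP", "MYS", "THA", "IDN", "VNM"]),
     ("VNM", ["SGP", "MYS", "THA", "IDN", "PHL"]),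
     ("MEX", ["BRA", "ARG", "CHL", "COL", "PER"]),
     ("ARG", ["BRA", "MEX", "CHL", "COL", "PER"]),
     ("CHL", ["BRA", "MEX", "ARG", "COL", "PER"]),
     ("COL", ["BRA", "MEX", "ARG", "CHL", "PER"]),
     ("PER", ["BRA", "MEX", "ARG", "CHL", "COL"]),
     ("SAU", ["ARE", "EGY", "TUR", "ISR", "MAR"]),
     ("ARE", ["SAU", "EGY", "TUR", "ISR", "MAR"]),
     ("EGY", ["SAU", "ARE", "TUR", "ISR", "MAR"]),
     ("TUR", ["SAU", "ARE", "EGY", "ISR", "MAR"]),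
     ("ISR", ["SAU", "ARE", "EGY", "TUR", "MAR"]),
     ("MAR", ["SAU", "ARE", "EGY", "TUR", "ISR"])]

def get_peer_countries_py_alt (iso : String) : List String :=
  pvPeerTable.getD iso ["BRA", "IND", "MEX"]

-- ===== PRECONDITION & SPEC =====
def Spec_get_peer_countries_py (iso : String) (out : List String) : Prop := out = get_peer_countries_py_alt iso
instance (iso : String) (out : List String) : Decidable (Spec_get_peer_countries_py iso out) := by unfold Spec_get_peer_countries_py; infer_instance

-- ===== CLAIM =====
def Claim_equal_get_peer_countries_py : Prop := ∀ (iso : String), Dom_get_peer_countries_py iso → Spec_get_peer_countries_py iso (get_peer_countries_py iso)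

-- ===== LEMMAS AND PROOFS =====

-- ===== VERDICT =====
theorem get_peer_countries_py_spec : Claim_equal_get_peer_countries_py := by
  intro iso _
  unfold Spec_get_peer_countries_py
  by_cases h0 : iso = "USA"
  · subst h0; rfl
  by_cases h1 : iso = "CAN"
  · subst h1; rfl
  by_cases h2 : iso = "GBR"
  · subst h2; rfl
  by_cases h3 : iso = "DEU"
  · subst h3; rfl
  by_cases h4 : iso = "FRA"
  · subst h4; rfl
  by_cases h5 : iso = "ITA"
  · subst h5; rfl
  by_cases h6 : iso = "JPN"
  · subst h6; rfl
  by_cases h7 : iso = "BRA"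
  · subst h7; rfl
  by_cases h8 : iso = "RUS"
  · subst h8; rfl
  by_cases h9 : iso = "IND"
  · subst h9; rfl
  by_cases h10 : iso = "CHN"
  · subst h10; rfl
  by_cases h11 : iso = "ZAF"
  · subst h11; rfl
  by_cases h12 : iso = "SGP"
  · subst h12; rfl
  by_cases h13 : iso = "MYS"
  · subst h13; rfl
  by_cases h14 : iso = "THA"
  · subst h14; rfl
  by_cases h15 : iso = "IDN"
  · subst h15; rfl
  by_cases h16 : iso = "PHL"
  · subst h16; rfl
  by_cases h17 : iso = "VNM"
  · subst h17; rfl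
  by_cases h18 : iso = "MEX"
  · subst h18; rfl
  by_cases h19 : iso = "ARG"
  · subst h19; rfl
  by_cases h20 : iso = "CHL"
  · subst h20; rfl
  by_cases h21 : iso = "COL"
  · subst h21; rfl
  by_cases h22 : iso = "PER"
  · subst h22; rfl
  by_cases h23 : iso = "SAU"
  · subst h23; rfl
  by_cases h24 : iso = "ARE"
  · subst h24; rfl
  by_cases h25 : iso = "EGY"
  · subst h25; rfl
  by_cases h26 : iso = "TUR"
  · subst h26; rfl
  by_cases h27 : iso = "ISR"
  · subst h27; rfl
  by_cases h28 : iso = "MAR"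
  · subst h28; rfl
  -- iso is none of the 29 member codes: A's loop misses every group, B's table lookup misses every key
  have f0 : (("USA" : String) == iso) = false := beq_eq_false_iff_ne.mpr (Ne.symm h0)
  have f1 : (("CAN" : String) == iso) = false := beq_eq_false_iff_ne.mpr (Ne.symm h1)
  have f2 : (("GBR" : String) == iso) = false := beq_eq_false_iff_ne.mpr (Ne.symm h2)
  have f3 : (("DEU" : String) == iso) = false := beq_eq_false_iff_ne.mpr (Ne.symm h3)
  have f4 : (("FRA" : String) == iso) = false := beq_eq_false_iff_ne.mpr (Ne.symm h4)
  have f5 : (("ITA" : String) == iso) = false := beq_eq_false_iff_ne.mpr (Ne.symm h5)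
  have f6 : (("JPN" : String) == iso) = false := beq_eq_false_iff_ne.mpr (Ne.symm h6)
  have f7 : (("BRA" : String) == iso) = false := beq_eq_false_iff_ne.mpr (Ne.symm h7)
  have f8 : (("RUS" : String) == iso) = false := beq_eq_false_iff_ne.mpr (Ne.symm h8)
  have f9 : (("IND" : String) == iso) = false := beq_eq_false_iff_ne.mpr (Ne.symm h9)
  have f10 : (("CHN" : String) == iso) = false := beq_eq_false_iff_ne.mpr (Ne.symm h10)
  have f11 : (("ZAF" : String) == iso) = false := beq_eq_false_iff_ne.mpr (Ne.symm h11)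
  have f12 : (("SGP" : String) == iso) = false := beq_eq_false_iff_ne.mpr (Ne.symm h12)
  have f13 : (("MYS" : String) == iso) = false := beq_eq_false_iff_ne.mpr (Ne.symm h13)
  have f14 : (("THA" : String) == iso) = false := beq_eq_false_iff_ne.mpr (Ne.symm h14)
  have f15 : (("IDN" : String) == iso) = false := beq_eq_false_iff_ne.mpr (Ne.symm h15)
  have f16 : (("PHL" : String) == iso) = false := beq_eq_false_iff_ne.mpr (Ne.symm h16)
  have f17 : (("VNM" : String) == iso) = false := beq_eq_false_iff_ne.mpr (Ne.symm h17)
  have f18 : (("MEX" : String) == iso) = false := beq_eq_false_iff_ne.mpr (Ne.symm h18)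
  have f19 : (("ARG" : String) == iso) = false := beq_eq_false_iff_ne.mpr (Ne.symm h19)
  have f20 : (("CHL" : String) == iso) = false := beq_eq_false_iff_ne.mpr (Ne.symm h20)
  have f21 : (("COL" : String) == iso) = false := beq_eq_false_iff_ne.mpr (Ne.symm h21)
  have f22 : (("PER" : String) == iso) = false := beq_eq_false_iff_ne.mpr (Ne.symm h22)
  have f23 : (("SAU" : String) == iso) = false := beq_eq_false_iff_ne.mpr (Ne.symm h23)
  have f24 : (("ARE" : String) == iso) = false := beq_eq_false_iff_ne.mpr (Ne.symm h24)
  have f25 : (("EGY" : String) == iso) = false := beq_eq_false_iff_ne.mpr (Ne.symm h25)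
  have f26 : (("TUR" : String) == iso) = false := beq_eq_false_iff_ne.mpr (Ne.symm h26)
  have f27 : (("ISR" : String) == iso) = false := beq_eq_false_iff_ne.mpr (Ne.symm h27)
  have f28 : (("MAR" : String) == iso) = false := beq_eq_false_iff_ne.mpr (Ne.symm h28)
  simp [get_peer_countries_py, get_peer_countries_py_alt, pvLoopA, pvGroupsA, pvPeerTable,
        PySem.Dict.getD, PySem.Dict.get?, List.find?,
        h0, h1, h2, h3, h4, h5, h6, h7, h8, h9, h10, h11, h12, h13, h14, h15, h16, h17, h18, h19, h20, h21, h22, h23, h24, h25, h26, h27, h28, f0, f1, f2, f3, f4, f5, f6, f7, f8, f9, f10, f11, f12, f13, f14, f15, f16, f17, f18, f19, f20, f21, f22, f23, f24, f25, f26, f27, f28]
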